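-- pv_equiv track=rewrite | github.com/Praveena-Krishnan/Leetcode_2025 | incture_practice/revenue_100.py | total_revenue
-- ===== SOURCE A (Python) =====
-- def total_revenue(n):
--     total = 0
--     for day in range(n):
--         weekday = day % 7
--         if weekday == 5 or weekday == 6:  # Friday or Saturday
--             revenue = 0
--         else:
--             revenue = (weekday + 1) * 100
--         total += revenue
--     return total
-- ===== SOURCE B (Python) =====
-- def total_revenue(n):
--     if n <= 0:
--         return 0
--     weeks, rem = divmod(n, 7)
--     r = min(rem, 5)
--     return weeks * 1500 + 100 * (r * (r + 1) // 2)
-- ===== Notes on version B (the rewrite author's own statement) =====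
-- stated objective: faster
-- what changed: Replaced the day-by-day loop with an O(1) closed form: a per-week constant times the number of full weeks plus a triangular-number sum for the remainder days.
import Mathlib
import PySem

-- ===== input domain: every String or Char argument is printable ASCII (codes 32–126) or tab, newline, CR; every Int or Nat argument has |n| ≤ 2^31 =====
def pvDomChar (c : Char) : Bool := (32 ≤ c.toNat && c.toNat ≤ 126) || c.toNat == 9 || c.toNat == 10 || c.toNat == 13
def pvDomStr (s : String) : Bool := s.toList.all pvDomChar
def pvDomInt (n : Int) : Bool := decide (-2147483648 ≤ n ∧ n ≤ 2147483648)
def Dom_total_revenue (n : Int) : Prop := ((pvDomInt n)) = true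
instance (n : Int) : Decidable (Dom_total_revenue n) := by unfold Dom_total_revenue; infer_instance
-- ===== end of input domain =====

-- B replaces A's O(n) day-by-day loop with an O(1) closed form (full weeks * 1500 + triangular remainder).

-- ===== PORT A =====
def total_revenue (n : Int) : Int :=
  (PySem.List.pyRange 0 n 1).foldl (fun total day =>
    let weekday := PySem.Int.mod day 7
    let revenue := if weekday = 5 ∨ weekday = 6 then 0 else (weekday + 1) * 100
    total + revenue) 0

-- ===== PORT B =====
def total_revenue_alt (n : Int) : Int :=
  if n ≤ 0 then 0
  else
    let weeks := PySem.Int.floordiv n 7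
    let rem := PySem.Int.mod n 7
    let r := min rem 5
    weeks * 1500 + 100 * (PySem.Int.floordiv (r * (r + 1)) 2)

-- ===== PRECONDITION & SPEC =====
def Spec_total_revenue (n : Int) (out : Int) : Prop := out = total_revenue_alt n
instance (n : Int) (out : Int) : Decidable (Spec_total_revenue n out) := by unfold Spec_total_revenue; infer_instance

-- ===== CLAIM (what is proved, stated in full; the proofs are below) =====
def Claim_equal_total_revenue : Prop := ∀ (n : Int), Dom_total_revenue n → Spec_total_revenue n (total_revenue n)

-- ===== LEMMAS AND PROOFS =====

theorem total_revenue_step (n : Int) (hn : 0 ≤ n) :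
    total_revenue (n + 1) = total_revenue n +
      (if PySem.Int.mod n 7 = 5 ∨ PySem.Int.mod n 7 = 6 then 0 else (PySem.Int.mod n 7 + 1) * 100) := by
  unfold total_revenue
  rw [PySem.List.pyRange_one_succ_right (by omega)]
  simp [List.foldl_append]

theorem alt_step (n : Int) (hn : 0 ≤ n) :
    total_revenue_alt (n + 1) = total_revenue_alt n +
      (if PySem.Int.mod n 7 = 5 ∨ PySem.Int.mod n 7 = 6 then 0 else (PySem.Int.mod n 7 + 1) * 100) := by
  unfold total_revenue_alt
  simp only [PySem.Int.mod_eq_emod_of_pos (show (0:Int) < 7 by norm_num),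
      PySem.Int.floordiv_eq_ediv_of_pos (show (0:Int) < 7 by norm_num),
      PySem.Int.floordiv_eq_ediv_of_pos (show (0:Int) < 2 by norm_num)]
  have h7 : n % 7 = 0 ∨ n % 7 = 1 ∨ n % 7 = 2 ∨ n % 7 = 3 ∨ n % 7 = 4 ∨ n % 7 = 5 ∨ n % 7 = 6 := by omega
  rcases h7 with h | h | h | h | h | h | h <;>
  · have h2 : (n + 1) % 7 = n % 7 + 1 ∨ (n + 1) % 7 = 0 := by omega
    rcases h2 with h2 | h2 <;>
    · first
      | (exfalso; omega)
      | (have h3 : (n + 1) / 7 = n / 7 ∨ (n + 1) / 7 = n / 7 + 1 := by omega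
         rcases h3 with h3 | h3 <;>
         · first
           | (exfalso; omega)
           | (rw [h2, h3, h]
              split_ifs with hle hle2 <;> norm_num at * <;> omega))

theorem key (k : Nat) : total_revenue (k : Int) = total_revenue_alt (k : Int) := by
  induction k with
  | zero => decide
  | succ m ih =>
      have hz : ((m + 1 : Nat) : Int) = (m : Int) + 1 := by push_cast; ring
      rw [hz, total_revenue_step (m : Int) (by positivity), alt_step (m : Int) (by positivity), ih]

-- ===== VERDICT (by name: the statement is the Claim_ definition above) =====
theorem total_revenue_spec : Claim_equal_total_revenue := by
  intro n _
  unfold Spec_total_revenue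
  by_cases hn : n ≤ 0
  · unfold total_revenue total_revenue_alt
    rw [PySem.List.pyRange_one_eq_nil (by omega)]
    simp [hn]
  · have h : n = ((n.toNat : Nat) : Int) := by omega
    rw [h]
    exact key n.toNat
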